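-- pv_equiv track=rewrite | github.com/DArtagan/resume | gen_markdown.py | _skip_whitespace_and_comments
-- ===== SOURCE A (Python) =====
-- def _skip_whitespace_and_comments(text, pos):
--     """Skip spaces, newlines, and % comments."""
--     while pos < len(text):
--         if text[pos] in " \t\n":
--             pos += 1
--         elif text[pos] == "%":
--             while pos < len(text) and text[pos] != "\n":
--                 pos += 1
--         else:
--             break
--     return pos
-- ===== SOURCE B (Python) =====
-- def _skip_whitespace_and_comments(text, pos):
--     """Skip spaces, newlines, and % comments."""
--     n = len(text)
--     if pos >= n:
--         return pos
--     in_comment = False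
--     for i in range(pos, n):
--         c = text[i]
--         if in_comment:
--             if c == "\n":
--                 in_comment = False
--         elif c == "%":
--             in_comment = True
--         elif c not in " \t\n":
--             return i
--     return n
-- ===== Notes on version B (the rewrite author's own statement) =====
-- stated objective: alternative
-- what changed: Replaces A's nested two-level loop (an outer dispatch loop with an inner character-scanning comment loop) by a single flat scan over range(pos, len(text)) driven by an explicit in_comment state flag (a two-state DFA), returning at the first significant character.
import Mathlib
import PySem

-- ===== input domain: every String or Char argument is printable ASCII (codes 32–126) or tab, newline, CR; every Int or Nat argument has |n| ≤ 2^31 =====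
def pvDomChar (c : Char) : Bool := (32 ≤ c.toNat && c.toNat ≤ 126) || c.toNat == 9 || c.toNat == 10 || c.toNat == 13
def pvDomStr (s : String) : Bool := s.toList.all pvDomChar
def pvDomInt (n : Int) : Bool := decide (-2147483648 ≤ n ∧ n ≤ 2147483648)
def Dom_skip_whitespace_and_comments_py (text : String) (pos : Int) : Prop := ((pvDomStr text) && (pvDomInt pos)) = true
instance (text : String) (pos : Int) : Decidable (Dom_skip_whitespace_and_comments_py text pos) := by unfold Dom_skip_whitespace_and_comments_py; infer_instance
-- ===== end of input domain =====

-- B replaces A's nested two-level loop by one flat scan with an explicit in_comment state flag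
-- (objective: alternative single-pass state machine; no speed claim).
-- Both loops are ported with a fuel counter (len(text) - pos steps always suffice); fuel is only
-- a totality guard, both ports compute exactly their Python's values.

-- ===== PORT A =====
-- inner loop: while pos < len(text) and text[pos] != "\n": pos += 1
def pvAInner (t : List Char) (fuel : Nat) (pos : Int) : Int :=
  match fuel with
  | 0 => pos
  | f + 1 =>
    if pos < (t.length : Int) ∧ PySem.List.pyGet? t pos ≠ some '\n' then
      pvAInner t f (pos + 1)
    else pos

-- outer loop of A
def pvAOuter (t : List Char) (fuel : Nat) (pos : Int) : Int :=
  match fuel with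
  | 0 => pos
  | f + 1 =>
    if pos < (t.length : Int) then
      match PySem.List.pyGet? t pos with
      | some c =>
        -- text[pos] in " \t\n"
        if c = ' ' ∨ c = '\t' ∨ c = '\n' then pvAOuter t f (pos + 1)
        else if c = '%' then pvAOuter t f (pvAInner t (f + 1) pos)
        else pos
      | none => pos   -- Python raises IndexError here (pos < -len(text)); outside Pre_
    else pos

def skip_whitespace_and_comments_py (text : String) (pos : Int) : Int :=
  pvAOuter text.toList ((text.toList.length : Int) - pos).toNat pos

-- ===== PORT B =====
-- for i in range(pos, n) with the in_comment state flag; returns n when the loop exhausts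
def pvBGo (t : List Char) (fuel : Nat) (i : Int) (inC : Bool) : Int :=
  match fuel with
  | 0 => (t.length : Int)
  | f + 1 =>
    if i < (t.length : Int) then
      match PySem.List.pyGet? t i with
      | some c =>
        if inC then
          if c = '\n' then pvBGo t f (i + 1) false else pvBGo t f (i + 1) true
        else if c = '%' then pvBGo t f (i + 1) true
        else if ¬ (c = ' ' ∨ c = '\t' ∨ c = '\n') then i
        else pvBGo t f (i + 1) false
      | none => i   -- Python raises IndexError here (i < -len(text)); outside Pre_
    else (t.length : Int)

def skip_whitespace_and_comments_py_alt (text : String) (pos : Int) : Int :=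
  if (text.toList.length : Int) ≤ pos then pos
  else pvBGo text.toList ((text.toList.length : Int) - pos).toNat pos false

-- ===== PRECONDITION & SPEC =====
-- Pre_ excludes exactly pos < -len(text), where A raises IndexError (text[pos]); B raises there too.
def Pre_skip_whitespace_and_comments_py (text : String) (pos : Int) : Prop :=
  -(text.toList.length : Int) ≤ pos
instance (text : String) (pos : Int) : Decidable (Pre_skip_whitespace_and_comments_py text pos) := by
  unfold Pre_skip_whitespace_and_comments_py; infer_instance

def pvWitness_skip_whitespace_and_comments_py : String × Int := ("  % c\n x", 0)

def Spec_skip_whitespace_and_comments_py (text : String) (pos : Int) (out : Int) : Prop := out = skip_whitespace_and_comments_py_alt text pos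
instance (text : String) (pos : Int) (out : Int) : Decidable (Spec_skip_whitespace_and_comments_py text pos out) := by unfold Spec_skip_whitespace_and_comments_py; infer_instance

-- ===== CLAIM =====
def Claim_equal_skip_whitespace_and_comments_py : Prop := ∀ (text : String) (pos : Int), Dom_skip_whitespace_and_comments_py text pos → Pre_skip_whitespace_and_comments_py text pos → Spec_skip_whitespace_and_comments_py text pos (skip_whitespace_and_comments_py text pos)

-- ===== LEMMAS AND PROOFS =====

-- at or past the end both loops ignore their fuel
theorem pvAInner_end (t : List Char) (fuel : Nat) (pos : Int) (h : ¬ pos < (t.length : Int)) :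
    pvAInner t fuel pos = pos := by
  cases fuel with
  | zero => rfl
  | succ f => rw [pvAInner, if_neg (by
      intro hc; exact h hc.1)]

theorem pvAOuter_end (t : List Char) (fuel : Nat) (pos : Int) (h : ¬ pos < (t.length : Int)) :
    pvAOuter t fuel pos = pos := by
  cases fuel with
  | zero => rfl
  | succ f => rw [pvAOuter, if_neg h]

theorem pvBGo_end (t : List Char) (fuel : Nat) (i : Int) (inC : Bool) (h : ¬ i < (t.length : Int)) :
    pvBGo t fuel i inC = (t.length : Int) := by
  cases fuel with
  | zero => rfl
  | succ f => rw [pvBGo, if_neg h]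

-- joint invariant: with enough fuel on each side, A's outer loop equals B's scan with inC = false,
-- and A's inner comment loop followed by the outer loop equals B's scan with inC = true
theorem pvMain (t : List Char) : ∀ (k : Nat) (pos : Int),
    ((t.length : Int) - pos).toNat ≤ k → -(t.length : Int) ≤ pos → pos ≤ (t.length : Int) →
    (∀ (fa fb : Nat), ((t.length : Int) - pos).toNat ≤ fa → ((t.length : Int) - pos).toNat ≤ fb →
      pvAOuter t fa pos = pvBGo t fb pos false) ∧
    (∀ (fa fi fb : Nat), ((t.length : Int) - pos).toNat ≤ fa → ((t.length : Int) - pos).toNat ≤ fi →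
      ((t.length : Int) - pos).toNat ≤ fb →
      pvAOuter t fa (pvAInner t fi pos) = pvBGo t fb pos true) := by
  intro k
  induction k with
  | zero =>
    intro pos hk h0 hn
    have hpe : ¬ pos < (t.length : Int) := by omega
    refine ⟨fun fa fb _ _ => ?_, fun fa fi fb _ _ _ => ?_⟩
    · rw [pvAOuter_end t fa pos hpe, pvBGo_end t fb pos false hpe]; omega
    · rw [pvAInner_end t fi pos hpe, pvAOuter_end t fa pos hpe, pvBGo_end t fb pos true hpe]; omega
  | succ k ih =>
    intro pos hk h0 hn
    by_cases hlt : pos < (t.length : Int)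
    · cases hc : PySem.List.pyGet? t pos with
      | none =>
        exfalso
        rw [PySem.List.pyGet?_eq_none_iff] at hc
        exact hc (by unfold PySem.Raise.InRange; omega)
      | some c =>
        obtain ⟨ih1, ih2⟩ := ih (pos + 1) (by omega) (by omega) (by omega)
        constructor
        · intro fa fb hfa hfb
          obtain ⟨fa', rfl⟩ : ∃ fa', fa = fa' + 1 := ⟨fa - 1, by omega⟩
          obtain ⟨fb', rfl⟩ : ∃ fb', fb = fb' + 1 := ⟨fb - 1, by omega⟩
          rw [pvAOuter, if_pos hlt, hc, pvBGo, if_pos hlt, hc]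
          by_cases hws : c = ' ' ∨ c = '\t' ∨ c = '\n'
          · have hnp : c ≠ '%' := by rcases hws with h | h | h <;> simp [h]
            simp only [if_pos hws]
            simp only [hnp, hws, if_false, Bool.false_eq_true, not_true]
            exact ih1 fa' fb' (by omega) (by omega)
          · by_cases hp : c = '%'
            · simp only [if_neg hws, if_pos hp, Bool.false_eq_true, if_false]
              have hinner : pvAInner t (fa' + 1) pos = pvAInner t fa' (pos + 1) := by
                rw [pvAInner, if_pos ⟨hlt, by rw [hc]; simp [hp]⟩]
              rw [hinner]
              exact ih2 fa' fa' fb' (by omega) (by omega) (by omega)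
            · simp [hws, hp]
        · intro fa fi fb hfa hfi hfb
          obtain ⟨fi', rfl⟩ : ∃ fi', fi = fi' + 1 := ⟨fi - 1, by omega⟩
          obtain ⟨fb', rfl⟩ : ∃ fb', fb = fb' + 1 := ⟨fb - 1, by omega⟩
          rw [pvBGo, if_pos hlt, hc]
          by_cases hnl : c = '\n'
          · subst hnl
            have hinner : pvAInner t (fi' + 1) pos = pos := by
              rw [pvAInner, if_neg (by simp [hc])]
            obtain ⟨fa', rfl⟩ : ∃ fa', fa = fa' + 1 := ⟨fa - 1, by omega⟩
            rw [hinner, pvAOuter, if_pos hlt, hc]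
            simpa using ih1 fa' fb' (by omega) (by omega)
          · have hinner : pvAInner t (fi' + 1) pos = pvAInner t fi' (pos + 1) := by
              rw [pvAInner, if_pos ⟨hlt, by rw [hc]; simp [hnl]⟩]
            rw [hinner]
            simp only [if_neg hnl]
            exact ih2 fa fi' fb' (by omega) (by omega) (by omega)
    · refine ⟨fun fa fb _ _ => ?_, fun fa fi fb _ _ _ => ?_⟩
      · rw [pvAOuter_end t fa pos hlt, pvBGo_end t fb pos false hlt]; omega
      · rw [pvAInner_end t fi pos hlt, pvAOuter_end t fa pos hlt, pvBGo_end t fb pos true hlt]; omega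

-- ===== VERDICT =====
theorem skip_whitespace_and_comments_py_spec : Claim_equal_skip_whitespace_and_comments_py := by
  intro text pos _hdom hpre
  unfold Spec_skip_whitespace_and_comments_py skip_whitespace_and_comments_py skip_whitespace_and_comments_py_alt
  by_cases hge : (text.toList.length : Int) ≤ pos
  · rw [if_pos hge, pvAOuter_end text.toList _ pos (by omega)]
  · rw [if_neg hge]
    exact (pvMain text.toList ((text.toList.length : Int) - pos).toNat pos le_rfl hpre (by omega)).1
      _ _ le_rfl le_rfl
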